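-- pv_equiv track=rewrite | github.com/Ramsaidhanumuri/Repo_DSA | InterviewBit/Arrays/Simulation array/Perfect Peak of Array.py | perfectPeak
-- ===== SOURCE A (Python) =====
-- def perfectPeak(A):
--     n = len(A)
--     l = [A[0]]*n
--     r = [A[n-1]]*n
--
--     for i in range(1, n):
--         l[i] = max(A[i], l[i-1])
--
--     for i in range(n-2, -1, -1):
--         r[i] = min(A[i], r[i+1])
--
--     for i in range(1, n-1):
--         if l[i-1] < A[i] < r[i+1]:
--             return 1
--
--     return 0
-- ===== SOURCE B (Python) =====
-- def perfectPeak(A):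
--     n = len(A)
--     leftMax = A[0]
--     cand = None
--     for j in range(1, n):
--         if cand is not None and A[j] <= cand:
--             cand = None
--         if cand is None and j < n - 1 and leftMax < A[j]:
--             cand = A[j]
--         if leftMax < A[j]:
--             leftMax = A[j]
--     return 1 if cand is not None else 0
-- ===== Notes on version B (the rewrite author's own statement) =====
-- stated objective: faster
-- what changed: B drops A's prefix-max and suffix-min arrays entirely and does a single forward pass keeping a running left maximum and one live candidate value (dropped as soon as a later element fails to exceed it); a candidate surviving to the end is a perfect peak, so three passes and two O(n) arrays become one pass with O(1) state.
import Mathlib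
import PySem

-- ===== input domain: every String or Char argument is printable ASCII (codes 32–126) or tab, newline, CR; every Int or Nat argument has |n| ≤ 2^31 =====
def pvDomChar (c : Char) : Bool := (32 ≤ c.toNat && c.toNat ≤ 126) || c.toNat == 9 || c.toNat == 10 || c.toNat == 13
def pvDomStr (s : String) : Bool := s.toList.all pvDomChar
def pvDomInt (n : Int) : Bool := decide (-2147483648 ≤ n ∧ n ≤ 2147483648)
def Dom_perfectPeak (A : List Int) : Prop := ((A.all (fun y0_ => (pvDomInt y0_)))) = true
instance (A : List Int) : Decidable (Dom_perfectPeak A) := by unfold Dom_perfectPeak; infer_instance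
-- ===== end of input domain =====

-- B replaces A's three passes over two auxiliary arrays by a single O(1)-space forward pass
-- with a running left maximum and one live candidate; return value only.

-- ===== PORT A =====
-- the final 'for i in range(1, n-1): if l[i-1] < A[i] < r[i+1]: return 1' loop with its early return
def ppScanA (A l r : List Int) : List Int → Int
  | [] => 0
  | i :: rest =>
    if PySem.List.pyGetD l (i - 1) 0 < PySem.List.pyGetD A i 0 ∧
       PySem.List.pyGetD A i 0 < PySem.List.pyGetD r (i + 1) 0 then 1
    else ppScanA A l r rest

def perfectPeak (A : List Int) : Int :=
  let n : Int := A.length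
  let l0 : List Int := List.replicate A.length (PySem.List.pyGetD A 0 0)
  let r0 : List Int := List.replicate A.length (PySem.List.pyGetD A (n - 1) 0)
  let l := (PySem.List.pyRange 1 n 1).foldl
      (fun l i => PySem.List.pySetD l i
        (max (PySem.List.pyGetD A i 0) (PySem.List.pyGetD l (i - 1) 0))) l0
  let r := (PySem.List.pyRange (n - 2) (-1) (-1)).foldl
      (fun r i => PySem.List.pySetD r i
        (min (PySem.List.pyGetD A i 0) (PySem.List.pyGetD r (i + 1) 0))) r0
  ppScanA A l r (PySem.List.pyRange 1 (n - 1) 1)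

-- ===== PORT B =====
-- one step of B's single loop: state is (leftMax, cand); follows Source B's three ifs in order
def ppStepB (A : List Int) (n : Int) (s : Int × Option Int) (j : Int) : Int × Option Int :=
  let a := PySem.List.pyGetD A j 0
  let cand := match s.2 with
    | some v => if a ≤ v then none else some v
    | none => none
  let cand := if cand = none ∧ j < n - 1 ∧ s.1 < a then some a else cand
  let leftMax := if s.1 < a then a else s.1
  (leftMax, cand)

def perfectPeak_alt (A : List Int) : Int :=
  let n : Int := A.length
  let s := (PySem.List.pyRange 1 n 1).foldl (ppStepB A n)
      (PySem.List.pyGetD A 0 0, (none : Option Int))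
  if s.2.isSome then 1 else 0

-- ===== PRECONDITION & SPEC =====
-- Pre_ excludes only the empty list, on which A raises IndexError reading A[0] (B raises there too).
def Pre_perfectPeak (A : List Int) : Prop := A ≠ []
instance (A : List Int) : Decidable (Pre_perfectPeak A) := by unfold Pre_perfectPeak; infer_instance
def pvWitness_perfectPeak : List Int := ([1, 5, 3] : List Int)

def Spec_perfectPeak (A : List Int) (out : Int) : Prop := out = perfectPeak_alt A
instance (A : List Int) (out : Int) : Decidable (Spec_perfectPeak A out) := by unfold Spec_perfectPeak; infer_instance

-- ===== CLAIM (what is proved, stated in full; the proofs are below) =====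
def Claim_equal_perfectPeak : Prop := ∀ (A : List Int), Dom_perfectPeak A → Pre_perfectPeak A → Spec_perfectPeak A (perfectPeak A)

-- ===== LEMMAS AND PROOFS =====

-- prefix maximum of A[0..j]
def ppPm (A : List Int) : Nat → Int
  | 0 => A.getD 0 0
  | j + 1 => max (A.getD (j + 1) 0) (ppPm A j)

-- suffix minimum of A[j..n-1]
def ppSm (A : List Int) (j : Nat) : Int :=
  (A.drop j).foldr min (A.getD (A.length - 1) 0)

-- "A has a perfect peak": ∃ interior index strictly above the prefix max and below the suffix min
def ppPeakEx (A : List Int) : Prop :=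
  ∃ k : Nat, 1 ≤ k ∧ k + 1 < A.length ∧ ppPm A (k - 1) < A.getD k 0 ∧ A.getD k 0 < ppSm A (k + 1)

theorem ppSm_last (A : List Int) (h : A ≠ []) : ppSm A (A.length - 1) = A.getD (A.length - 1) 0 := by
  have hlen : 0 < A.length := List.length_pos_iff.mpr h
  unfold ppSm
  rw [List.drop_eq_getElem_cons (by omega)]
  have hdrop : A.drop (A.length - 1 + 1) = [] := List.drop_eq_nil_of_le (by omega)
  rw [hdrop]
  simp [List.getD_eq_getElem?_getD, List.getElem?_eq_getElem (show A.length - 1 < A.length by omega)]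

theorem ppSm_rec (A : List Int) (j : Nat) (h : j + 1 < A.length) :
    ppSm A j = min (A.getD j 0) (ppSm A (j + 1)) := by
  unfold ppSm
  rw [List.drop_eq_getElem_cons (show j < A.length by omega)]
  rw [List.foldr_cons]
  simp [List.getD_eq_getElem?_getD, List.getElem?_eq_getElem (show j < A.length by omega)]

theorem ppSm_lt (A : List Int) (x : Int) : ∀ (t m : Nat), m < A.length → A.length - 1 - m ≤ t →
    (x < ppSm A m ↔ ∀ k, m ≤ k → k < A.length → x < A.getD k 0) := by
  intro t
  induction t with
  | zero =>
    intro m hm ht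
    have hme : m = A.length - 1 := by omega
    subst hme
    rw [ppSm_last A (by intro h; subst h; simp at hm)]
    constructor
    · intro hx k hk1 hk2
      have : k = A.length - 1 := by omega
      subst this; exact hx
    · intro h; exact h _ (le_refl _) (by omega)
  | succ t ih =>
    intro m hm ht
    by_cases hend : m = A.length - 1
    · subst hend
      rw [ppSm_last A (by intro h; subst h; simp at hm)]
      constructor
      · intro hx k hk1 hk2
        have : k = A.length - 1 := by omega
        subst this; exact hx
      · intro h; exact h _ (le_refl _) (by omega)
    · rw [ppSm_rec A m (by omega), lt_min_iff, ih (m + 1) (by omega) (by omega)]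
      constructor
      · rintro ⟨h1, h2⟩ k hk1 hk2
        rcases eq_or_lt_of_le hk1 with h | h
        · subst h; exact h1
        · exact h2 k h hk2
      · intro h
        exact ⟨h m (le_refl _) hm, fun k hk1 hk2 => h k (by omega) hk2⟩

-- characterisation of A's prefix-max array l
theorem ppL_spec (A : List Int) : ∀ k : Nat, 1 ≤ k → k ≤ A.length →
    ((PySem.List.pyRange 1 (k : Int) 1).foldl
      (fun l i => PySem.List.pySetD l i
        (max (PySem.List.pyGetD A i 0) (PySem.List.pyGetD l (i - 1) 0)))
      (List.replicate A.length (PySem.List.pyGetD A 0 0))).length = A.length ∧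
    ∀ j : Nat, j < k →
      ((PySem.List.pyRange 1 (k : Int) 1).foldl
        (fun l i => PySem.List.pySetD l i
          (max (PySem.List.pyGetD A i 0) (PySem.List.pyGetD l (i - 1) 0)))
        (List.replicate A.length (PySem.List.pyGetD A 0 0))).getD j 0 = ppPm A j := by
  intro k
  induction k with
  | zero => intro h; omega
  | succ k ih =>
    intro _ hk
    by_cases hk1 : k = 0
    · subst hk1
      rw [show ((0 + 1 : Nat) : Int) = 1 by norm_num,
        PySem.List.pyRange_one_eq_nil (le_refl 1)]
      simp only [List.foldl_nil, List.length_replicate, true_and]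
      intro j hj
      have hj0 : j = 0 := by omega
      subst hj0
      have hlen : 0 < A.length := by omega
      rcases A with _ | ⟨a, A'⟩
      · simp at hlen
      · simp [ppPm, PySem.List.pyGetD_zero]
    · obtain ⟨ihlen, ihval⟩ := ih (by omega) (by omega)
      rw [show ((k + 1 : Nat) : Int) = (k : Int) + 1 by push_cast; ring,
        PySem.List.pyRange_one_succ_right (by omega), List.foldl_append]
      simp only [List.foldl_cons, List.foldl_nil]
      rw [show ((k : Int) - 1) = ((k - 1 : Nat) : Int) by omega]
      simp only [PySem.List.pyGetD_natCast, PySem.List.pySetD_natCast]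
      have hval : max (A.getD k 0) (((PySem.List.pyRange 1 (k : Int) 1).foldl
          (fun l i => PySem.List.pySetD l i
            (max (PySem.List.pyGetD A i 0) (PySem.List.pyGetD l (i - 1) 0)))
          (List.replicate A.length (PySem.List.pyGetD A 0 0))).getD (k - 1) 0) = ppPm A k := by
        rw [ihval (k - 1) (by omega)]
        rw [show k = (k - 1) + 1 by omega]
        rfl
      rw [hval]
      constructor
      · simp [ihlen]
      · intro j hj
        by_cases hjk : j = k
        · subst hjk
          rw [List.getD_eq_getElem?_getD, List.getElem?_set_self (by omega)]
          rfl
        · rw [List.getD_eq_getElem?_getD, List.getElem?_set_ne (by omega),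
            ← List.getD_eq_getElem?_getD]
          exact ihval j (by omega)

-- characterisation of A's suffix-min array r
theorem ppRval (A : List Int) : ∀ m : Nat, m < A.length → ∀ r0 : List Int, r0.length = A.length →
    (∀ j, m ≤ j → j < A.length → r0.getD j 0 = ppSm A j) →
    ((PySem.List.pyRange ((m : Int) - 1) (-1) (-1)).foldl
      (fun r i => PySem.List.pySetD r i
        (min (PySem.List.pyGetD A i 0) (PySem.List.pyGetD r (i + 1) 0))) r0).length = A.length ∧
    ∀ j, j < A.length →
      ((PySem.List.pyRange ((m : Int) - 1) (-1) (-1)).foldl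
        (fun r i => PySem.List.pySetD r i
          (min (PySem.List.pyGetD A i 0) (PySem.List.pyGetD r (i + 1) 0))) r0).getD j 0 = ppSm A j := by
  intro m
  induction m with
  | zero =>
    intro hm r0 hlen hval
    rw [show ((0 : Nat) : Int) - 1 = -1 by norm_num,
      PySem.List.pyRange_neg_one_eq_nil (le_refl (-1))]
    simp only [List.foldl_nil]
    exact ⟨hlen, fun j hj => hval j (Nat.zero_le j) hj⟩
  | succ m ih =>
    intro hm r0 hlen hval
    rw [show ((m + 1 : Nat) : Int) - 1 = (m : Int) by push_cast; ring,
      PySem.List.pyRange_neg_one_cons (by omega)]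
    simp only [List.foldl_cons,
      show ((m : Int) + 1) = ((m + 1 : Nat) : Int) by push_cast; ring,
      PySem.List.pyGetD_natCast, PySem.List.pySetD_natCast]
    have hset : min (A.getD m 0) (r0.getD (m + 1) 0) = ppSm A m := by
      rw [hval (m + 1) (le_refl _) hm, ← ppSm_rec A m hm]
    rw [hset]
    have := ih (by omega) (r0.set m (ppSm A m)) (by simp [hlen]) ?_
    · rw [show ((m : Nat) : Int) - 1 = ((m : Int) - 1) by norm_num] at this
      exact this
    · intro j hj1 hj2
      rcases eq_or_lt_of_le hj1 with h | h
      · subst h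
        rw [List.getD_eq_getElem?_getD, List.getElem?_set_self (by omega)]
        rfl
      · rw [List.getD_eq_getElem?_getD, List.getElem?_set_ne (by omega),
          ← List.getD_eq_getElem?_getD]
        exact hval j (by omega) hj2

-- A's scan returns 0 or 1
theorem ppScanA_01 (A l r : List Int) : ∀ L, ppScanA A l r L = 0 ∨ ppScanA A l r L = 1 := by
  intro L
  induction L with
  | nil => left; rfl
  | cons i rest ih =>
    simp only [ppScanA]
    split_ifs with h
    · right; rfl
    · exact ih

-- A's scan finds 1 exactly when a perfect-peak index exists in the remaining range
theorem ppScanA_char (A l r : List Int)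
    (hl : ∀ j, j < A.length → l.getD j 0 = ppPm A j)
    (hr : ∀ j, j < A.length → r.getD j 0 = ppSm A j) :
    ∀ (t i : Nat), 1 ≤ i → (A.length : Int) - 1 - i ≤ t →
    (ppScanA A l r (PySem.List.pyRange (i : Int) ((A.length : Int) - 1) 1) = 1 ↔
     ∃ k : Nat, i ≤ k ∧ k + 1 < A.length ∧ ppPm A (k - 1) < A.getD k 0 ∧ A.getD k 0 < ppSm A (k + 1)) := by
  intro t
  induction t with
  | zero =>
    intro i hi ht
    rw [PySem.List.pyRange_one_eq_nil (by omega)]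
    simp only [ppScanA]
    constructor
    · intro h; exact absurd h (by norm_num)
    · rintro ⟨k, hk1, hk2, _⟩; omega
  | succ t ih =>
    intro i hi ht
    by_cases hend : (A.length : Int) - 1 ≤ (i : Int)
    · rw [PySem.List.pyRange_one_eq_nil hend]
      simp only [ppScanA]
      constructor
      · intro h; exact absurd h (by norm_num)
      · rintro ⟨k, hk1, hk2, _⟩; omega
    · rw [PySem.List.pyRange_one_cons (by omega)]
      simp only [ppScanA]
      have hgl : PySem.List.pyGetD l ((i : Int) - 1) 0 = ppPm A (i - 1) := by
        rw [show ((i : Int) - 1) = ((i - 1 : Nat) : Int) by omega, PySem.List.pyGetD_natCast]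
        exact hl (i - 1) (by omega)
      have hga : PySem.List.pyGetD A (i : Int) 0 = A.getD i 0 := PySem.List.pyGetD_natCast A i 0
      have hgr : PySem.List.pyGetD r ((i : Int) + 1) 0 = ppSm A (i + 1) := by
        rw [show ((i : Int) + 1) = ((i + 1 : Nat) : Int) by push_cast; ring, PySem.List.pyGetD_natCast]
        exact hr (i + 1) (by omega)
      rw [hgl, hga, hgr]
      split_ifs with hc
      · constructor
        · intro _; exact ⟨i, le_refl _, by omega, hc.1, hc.2⟩
        · intro _; rfl
      · rw [show ((i : Int) + 1) = ((i + 1 : Nat) : Int) by push_cast; ring]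
        rw [ih (i + 1) (by omega) (by omega)]
        constructor
        · rintro ⟨k, hk1, hk2, hk3, hk4⟩; exact ⟨k, by omega, hk2, hk3, hk4⟩
        · rintro ⟨k, hk1, hk2, hk3, hk4⟩
          refine ⟨k, ?_, hk2, hk3, hk4⟩
          rcases eq_or_lt_of_le hk1 with h | h
          · exfalso; subst h; exact hc ⟨hk3, hk4⟩
          · omega

-- a candidate index that has already been beaten by a later element ≤ it
def ppDead (A : List Int) (j i : Nat) : Prop := ∃ k, i < k ∧ k ≤ j ∧ A.getD k 0 ≤ A.getD i 0

-- an interior index strictly above its prefix max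
def ppQual (A : List Int) (i : Nat) : Prop := 1 ≤ i ∧ i + 1 < A.length ∧ ppPm A (i - 1) < A.getD i 0

-- the loop invariant of B's single pass after processing indices 1..j
def ppInv (A : List Int) (j : Nat) (s : Int × Option Int) : Prop :=
  s.1 = ppPm A j ∧
  (s.2 = none → ∀ i, ppQual A i → i ≤ j → ppDead A j i) ∧
  (∀ v, s.2 = some v → ∃ i, ppQual A i ∧ i ≤ j ∧ A.getD i 0 = v ∧
      (∀ k, i < k → k ≤ j → v < A.getD k 0) ∧
      (∀ i', ppQual A i' → i' ≤ j → i' ≠ i → ppDead A j i' ∨ v < A.getD i' 0))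

theorem ppPm_le (A : List Int) (i : Nat) : ∀ j : Nat, i ≤ j → ppPm A i ≤ ppPm A j := by
  intro j
  induction j with
  | zero =>
    intro hij
    rw [Nat.le_zero.mp hij]
  | succ j ih =>
    intro hij
    by_cases h : i = j + 1
    · rw [h]
    · exact le_trans (ih (by omega)) (le_max_right _ _)

theorem ppPm_ge_getD (A : List Int) : ∀ (i j : Nat), i ≤ j → A.getD i 0 ≤ ppPm A j := by
  intro i j hij
  have h1 : A.getD i 0 ≤ ppPm A i := by
    cases i with
    | zero => exact le_of_eq rfl
    | succ i => exact le_max_left _ _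
  exact le_trans h1 (ppPm_le A i j hij)

theorem ppDead_mono (A : List Int) (j j' i : Nat) (h : j ≤ j') (hd : ppDead A j i) :
    ppDead A j' i := by
  obtain ⟨k, hk1, hk2, hk3⟩ := hd
  exact ⟨k, hk1, by omega, hk3⟩

theorem ppInv_step (A : List Int) (j : Nat) (s : Int × Option Int)
    (hinv : ppInv A j s) :
    ppInv A (j + 1) (ppStepB A A.length s ((j + 1 : Nat) : Int)) := by
  obtain ⟨hlm, hnone, hsome⟩ := hinv
  have hga : PySem.List.pyGetD A ((j + 1 : Nat) : Int) 0 = A.getD (j + 1) 0 :=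
    PySem.List.pyGetD_natCast A (j + 1) 0
  have hpm : ppPm A (j + 1) = max (A.getD (j + 1) 0) (ppPm A j) := rfl
  have hjlt : ((j + 1 : Nat) : Int) < (A.length : Int) - 1 ↔ j + 1 + 1 < A.length := by
    constructor <;> (intro h; push_cast at *; omega)
  rcases hs : s.2 with _ | v
  · -- cand was None; it stays None unless index j+1 qualifies
    simp only [ppStepB, hs, hga]
    by_cases hcv : ((j + 1 : Nat) : Int) < (A.length : Int) - 1 ∧ s.1 < A.getD (j + 1) 0
    · -- new candidate A[j+1]
      have hc2 : True ∧ ((j + 1 : Nat) : Int) < (A.length : Int) - 1 ∧ s.1 < A.getD (j + 1) 0 :=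
        ⟨trivial, hcv.1, hcv.2⟩
      rw [if_pos hc2, if_pos hcv.2]
      refine ⟨?_, ?_, ?_⟩
      · show A.getD (j + 1) 0 = ppPm A (j + 1)
        rw [hpm]
        have h1 : ppPm A j < A.getD (j + 1) 0 := hlm ▸ hcv.2
        omega
      · intro habs
        exact absurd habs (by simp)
      · intro v hv
        have hv' : A.getD (j + 1) 0 = v := by simpa using hv
        subst hv'
        refine ⟨j + 1, ⟨by omega, hjlt.mp hcv.1, ?_⟩, le_refl _, rfl, ?_, ?_⟩
        · rw [show j + 1 - 1 = j by omega, ← hlm]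
          exact hcv.2
        · intro k hk1 hk2
          omega
        · intro i' hq hle hne
          exact Or.inl (ppDead_mono A j (j + 1) i' (by omega)
            (hnone hs i' hq (by omega)))
    · -- no new candidate
      have hc2 : ¬ (True ∧ ((j + 1 : Nat) : Int) < (A.length : Int) - 1 ∧ s.1 < A.getD (j + 1) 0) :=
        fun h => hcv ⟨h.2.1, h.2.2⟩
      rw [if_neg hc2]
      have hlm' : (if s.1 < A.getD (j + 1) 0 then A.getD (j + 1) 0 else s.1) = ppPm A (j + 1) := by
        rw [hpm, ← hlm]
        split_ifs with h <;> omega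
      refine ⟨hlm', ?_, ?_⟩
      · intro _ i hq hle
        by_cases hij : i ≤ j
        · exact ppDead_mono A j (j + 1) i (by omega) (hnone hs i hq hij)
        · exfalso
          have hie : i = j + 1 := by omega
          subst hie
          obtain ⟨_, hq2, hq3⟩ := hq
          rw [show j + 1 - 1 = j by omega, ← hlm] at hq3
          exact hcv ⟨hjlt.mpr hq2, hq3⟩
      · intro v hv
        exact absurd hv (by simp)
  · -- cand was some v
    obtain ⟨i, hqi, hile, hiv, hlive, hothers⟩ := hsome v hs
    have hqi1 : 1 ≤ i := hqi.1
    have hqi2 : i + 1 < A.length := hqi.2.1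
    have hvle : v ≤ ppPm A j := hiv ▸ ppPm_ge_getD A i j hile
    simp only [ppStepB, hs, hga]
    by_cases hav : A.getD (j + 1) 0 ≤ v
    · -- candidate dies at j+1
      rw [if_pos hav]
      have hnlt : ¬ s.1 < A.getD (j + 1) 0 := by rw [hlm]; omega
      have hc2 : ¬ ((none : Option Int) = none ∧ ((j + 1 : Nat) : Int) < (A.length : Int) - 1 ∧
          s.1 < A.getD (j + 1) 0) := fun h => hnlt h.2.2
      rw [if_neg hc2, if_neg hnlt]
      refine ⟨?_, ?_, ?_⟩
      · show s.1 = ppPm A (j + 1)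
        rw [hpm, hlm]
        rw [hlm] at hnlt
        omega
      · intro _ i' hq hle
        by_cases hii : i' ≤ j
        · by_cases hie : i' = i
          · subst hie
            exact ⟨j + 1, by omega, le_refl _, by rw [hiv]; exact hav⟩
          · rcases hothers i' hq hii hie with hd | hlt
            · exact ppDead_mono A j (j + 1) i' (by omega) hd
            · exact ⟨j + 1, by omega, le_refl _, by omega⟩
        · exfalso
          have : i' = j + 1 := by omega
          subst this
          obtain ⟨_, _, hq3⟩ := hq
          rw [show j + 1 - 1 = j by omega, ← hlm] at hq3
          exact hnlt hq3
      · intro v' hv'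
        exact absurd hv' (by simp)
    · -- candidate survives
      rw [if_neg hav]
      have hc2 : ¬ ((some v : Option Int) = none ∧ ((j + 1 : Nat) : Int) < (A.length : Int) - 1 ∧
          s.1 < A.getD (j + 1) 0) := by
        intro h
        exact absurd h.1 (by simp)
      rw [if_neg hc2]
      have hlm' : (if s.1 < A.getD (j + 1) 0 then A.getD (j + 1) 0 else s.1) = ppPm A (j + 1) := by
        rw [hpm, ← hlm]
        split_ifs with h <;> omega
      refine ⟨hlm', ?_, ?_⟩
      · intro habs
        exact absurd habs (by simp)
      · intro v' hv'
        have hv'' : v = v' := by simpa using hv'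
        subst hv''
        refine ⟨i, hqi, by omega, hiv, ?_, ?_⟩
        · intro k hk1 hk2
          by_cases hke : k = j + 1
          · subst hke
            omega
          · exact hlive k hk1 (by omega)
        · intro i' hq hle hne
          by_cases hii : i' ≤ j
          · rcases hothers i' hq hii hne with hd | hlt
            · exact Or.inl (ppDead_mono A j (j + 1) i' (by omega) hd)
            · exact Or.inr hlt
          · have : i' = j + 1 := by omega
            subst this
            exact Or.inr (by omega)

-- the invariant holds after processing indices 1..m
theorem ppInv_fold (A : List Int) : ∀ m : Nat, m < A.length →
    ppInv A m ((PySem.List.pyRange 1 ((m + 1 : Nat) : Int) 1).foldl (ppStepB A A.length)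
      (PySem.List.pyGetD A 0 0, (none : Option Int))) := by
  intro m
  induction m with
  | zero =>
    intro _
    rw [show ((0 + 1 : Nat) : Int) = 1 by norm_num, PySem.List.pyRange_one_eq_nil (le_refl 1)]
    simp only [List.foldl_nil]
    refine ⟨by rw [PySem.List.pyGetD_zero]; rfl, ?_, ?_⟩
    · intro _ i hq hle
      exact absurd hq.1 (by omega)
    · intro v hv
      exact absurd hv (by simp)
  | succ m ih =>
    intro hm
    rw [show ((m + 1 + 1 : Nat) : Int) = ((m + 1 : Nat) : Int) + 1 by push_cast; ring,
      PySem.List.pyRange_one_succ_right (by push_cast; omega), List.foldl_append]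
    simp only [List.foldl_cons, List.foldl_nil]
    exact ppInv_step A m _ (ih (by omega))

-- B returns 0 or 1
theorem ppB_01 (A : List Int) : perfectPeak_alt A = 0 ∨ perfectPeak_alt A = 1 := by
  simp only [perfectPeak_alt]
  split_ifs <;> simp

-- B returns 1 exactly when a perfect peak exists
theorem ppB_char (A : List Int) (hA : A ≠ []) : perfectPeak_alt A = 1 ↔ ppPeakEx A := by
  have hlen : 0 < A.length := List.length_pos_iff.mpr hA
  have hinv := ppInv_fold A (A.length - 1) (by omega)
  rw [show ((A.length - 1 + 1 : Nat) : Int) = (A.length : Int) by omega] at hinv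
  simp only [perfectPeak_alt]
  obtain ⟨_, hnone, hsome⟩ := hinv
  rcases hs : ((PySem.List.pyRange 1 ((A.length : Int)) 1).foldl (ppStepB A (A.length : Int))
      (PySem.List.pyGetD A 0 0, (none : Option Int))).2 with _ | v
  · simp only [Option.isSome_none, Bool.false_eq_true, if_false]
    constructor
    · intro h; exact absurd h (by norm_num)
    · rintro ⟨k, hk1, hk2, hk3, hk4⟩
      exfalso
      obtain ⟨k', hk'1, hk'2, hk'3⟩ := hnone hs k ⟨hk1, hk2, hk3⟩ (by omega)
      rw [ppSm_lt A (A.getD k 0) (A.length) (k + 1) (by omega) (by omega)] at hk4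
      exact absurd (hk4 k' (by omega) (by omega)) (by omega)
  · simp only [Option.isSome_some, if_true]
    obtain ⟨i, ⟨hi1, hi2, hi3⟩, hi4, hi5, hi6, _⟩ := hsome v hs
    constructor
    · intro _
      refine ⟨i, hi1, hi2, hi3, ?_⟩
      rw [ppSm_lt A (A.getD i 0) (A.length) (i + 1) (by omega) (by omega)]
      intro k hk1 hk2
      rw [hi5]
      exact hi6 k (by omega) (by omega)
    · intro _; trivial

-- A returns 0 or 1
theorem ppA_01 (A : List Int) : perfectPeak A = 0 ∨ perfectPeak A = 1 := by
  unfold perfectPeak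
  exact ppScanA_01 _ _ _ _

-- A returns 1 exactly when a perfect peak exists
theorem ppA_char (A : List Int) (hA : A ≠ []) : perfectPeak A = 1 ↔ ppPeakEx A := by
  have hlen : 1 ≤ A.length := by
    rcases A with _ | _
    · exact absurd rfl hA
    · simp
  unfold perfectPeak
  simp only
  obtain ⟨hllen, hlval⟩ := ppL_spec A A.length hlen (le_refl _)
  have hlast : PySem.List.pyGetD A ((A.length : Int) - 1) 0 = A.getD (A.length - 1) 0 := by
    rw [show ((A.length : Int) - 1) = ((A.length - 1 : Nat) : Int) by omega,
      PySem.List.pyGetD_natCast]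
  have hr := ppRval A (A.length - 1) (by omega)
      (List.replicate A.length (PySem.List.pyGetD A ((A.length : Int) - 1) 0)) (by simp) ?_
  swap
  · intro j hj1 hj2
    have hje : j = A.length - 1 := by omega
    subst hje
    rw [List.getD_eq_getElem?_getD, List.getElem?_replicate, if_pos hj2, hlast,
      ppSm_last A hA]
    rfl
  obtain ⟨hrlen, hrval⟩ := hr
  rw [show ((A.length - 1 : Nat) : Int) - 1 = (A.length : Int) - 2 by omega] at hrval
  have hchar := ppScanA_char A _ _ (fun j hj => hlval j hj) hrval A.length 1 (le_refl 1) (by omega)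
  rw [show ((1 : Nat) : Int) = 1 by norm_num] at hchar
  rw [hchar]
  unfold ppPeakEx
  constructor
  · rintro ⟨k, h1, h2, h3, h4⟩; exact ⟨k, h1, h2, h3, h4⟩
  · rintro ⟨k, h1, h2, h3, h4⟩; exact ⟨k, h1, h2, h3, h4⟩

-- ===== VERDICT (by name: the statement is the Claim_ definition above) =====
theorem perfectPeak_spec : Claim_equal_perfectPeak := by
  intro A hDom hPre
  unfold Pre_perfectPeak at hPre
  unfold Spec_perfectPeak
  by_cases hP : ppPeakEx A
  · rw [(ppA_char A hPre).2 hP, (ppB_char A hPre).2 hP]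
  · have hA := ppA_01 A
    have hB := ppB_01 A
    rcases hA with hA | hA
    · rcases hB with hB | hB
      · rw [hA, hB]
      · exact absurd ((ppB_char A hPre).1 hB) hP
    · exact absurd ((ppA_char A hPre).1 hA) hP
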